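-- pv_equiv track=rewrite | github.com/silkeholmebonnen/iml-exercises | w8/filtering_util.py | remove_noise
-- ===== SOURCE A (Python) =====
-- def remove_noise(px, py, x_spikes, y_spikes):
--     px_new = []
--     py_new = []
--     px_recent = px[0]
--     py_recent = py[0]
--     for i in range(len(px)):
--         if i not in x_spikes:
--             px_new.append(px[i])
--             px_recent = px[i]
--         else:
--             px_new.append(px_recent)
--
--     for i in range(len(py)):
--         if i not in y_spikes:
--             py_new.append(py[i])
--             py_recent = py[i]
--         else:
--             py_new.append(py_recent)
--     return px_new, py_new
-- ===== SOURCE B (Python) =====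
-- def remove_noise(px, py, x_spikes, y_spikes):
--     def ffill(vals, spikes):
--         out = list(vals)
--         for i in sorted(set(spikes)):
--             if 0 < i < len(out):
--                 out[i] = out[i - 1]
--         return out
--     return ffill(px, x_spikes), ffill(py, y_spikes)
-- ===== Notes on version B (the rewrite author's own statement) =====
-- stated objective: alternative
-- what changed: Instead of looping over every index with a carried 'recent' variable and an O(s) list-membership test per index, B copies the input and patches only the sorted distinct spike positions in increasing order, setting out[i] = out[i-1].
import Mathlib
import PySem

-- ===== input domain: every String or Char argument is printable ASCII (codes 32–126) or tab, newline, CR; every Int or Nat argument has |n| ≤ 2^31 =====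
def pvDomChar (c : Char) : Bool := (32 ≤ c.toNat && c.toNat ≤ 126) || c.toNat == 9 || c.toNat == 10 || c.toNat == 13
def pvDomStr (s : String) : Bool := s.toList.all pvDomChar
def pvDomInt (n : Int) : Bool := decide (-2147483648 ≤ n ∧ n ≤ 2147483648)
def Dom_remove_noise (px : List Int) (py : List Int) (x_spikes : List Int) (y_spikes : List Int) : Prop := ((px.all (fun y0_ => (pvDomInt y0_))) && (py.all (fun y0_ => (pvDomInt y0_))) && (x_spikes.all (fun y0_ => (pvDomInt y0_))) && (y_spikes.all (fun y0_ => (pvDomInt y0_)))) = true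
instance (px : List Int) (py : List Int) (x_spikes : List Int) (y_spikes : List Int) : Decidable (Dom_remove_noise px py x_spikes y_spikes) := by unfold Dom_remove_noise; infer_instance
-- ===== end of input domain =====

-- B forward-fills by patching only the (sorted distinct) spike positions of a copy of the
-- input, instead of A's index loop over every position with a carried "recent" variable.

-- ===== PORT A =====
-- one loop of A: for i in range(len(vals)): if i not in spikes: append vals[i], update recent; else append recent
-- vals[i] is in range for every i produced by range(len(vals)), so pyGetD's default is never read (exact)
def pvLoopA (vals : List Int) (spikes : List Int) (recent0 : Int) : List Int × Int :=
  (PySem.List.pyRange 0 (PySem.List.len vals) 1).foldl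
    (fun (st : List Int × Int) i =>
      if ¬ (i ∈ spikes) then (st.1 ++ [PySem.List.pyGetD vals i 0], PySem.List.pyGetD vals i 0)
      else (st.1 ++ [st.2], st.2))
    ([], recent0)

-- px[0] / py[0]: Python raises IndexError on an empty list; Pre_ excludes that, the default is never read
def remove_noise (px : List Int) (py : List Int) (x_spikes : List Int) (y_spikes : List Int) : List Int × List Int :=
  let px_recent := PySem.List.pyGetD px 0 0
  let py_recent := PySem.List.pyGetD py 0 0
  ((pvLoopA px x_spikes px_recent).1, (pvLoopA py y_spikes py_recent).1)

-- ===== PORT B =====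
-- out = list(vals); for i in sorted(set(spikes)): if 0 < i < len(out): out[i] = out[i-1]
def pvFfill (vals : List Int) (spikes : List Int) : List Int :=
  (PySem.List.sorted (PySem.Set.ofList spikes) (fun x => x) false).foldl
    (fun (out : List Int) i =>
      if 0 < i ∧ i < PySem.List.len out then
        PySem.List.pySetD out i (PySem.List.pyGetD out (i - 1) 0)
      else out)
    vals

def remove_noise_alt (px : List Int) (py : List Int) (x_spikes : List Int) (y_spikes : List Int) : List Int × List Int :=
  (pvFfill px x_spikes, pvFfill py y_spikes)

-- ===== PRECONDITION & SPEC =====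
-- A evaluates px[0] and py[0] before its loops: it raises IndexError iff px or py is empty
def Pre_remove_noise (px : List Int) (py : List Int) (x_spikes : List Int) (y_spikes : List Int) : Prop :=
  px ≠ [] ∧ py ≠ []
instance (px : List Int) (py : List Int) (x_spikes : List Int) (y_spikes : List Int) : Decidable (Pre_remove_noise px py x_spikes y_spikes) := by unfold Pre_remove_noise; infer_instance

def pvWitness_remove_noise : List Int × List Int × List Int × List Int := ([1, 9, 3], [4, 5, 7], [1], [0, 2])

def Spec_remove_noise (px : List Int) (py : List Int) (x_spikes : List Int) (y_spikes : List Int) (out : List Int × List Int) : Prop := out = remove_noise_alt px py x_spikes y_spikes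
instance (px : List Int) (py : List Int) (x_spikes : List Int) (y_spikes : List Int) (out : List Int × List Int) : Decidable (Spec_remove_noise px py x_spikes y_spikes out) := by unfold Spec_remove_noise; infer_instance

-- ===== CLAIM (what is proved, stated in full; the proofs are below) =====
def Claim_equal_remove_noise : Prop := ∀ (px : List Int) (py : List Int) (x_spikes : List Int) (y_spikes : List Int), Dom_remove_noise px py x_spikes y_spikes → Pre_remove_noise px py x_spikes y_spikes → Spec_remove_noise px py x_spikes y_spikes (remove_noise px py x_spikes y_spikes)

-- ===== LEMMAS AND PROOFS =====

-- the common forward-fill value at index j: vals[j] if j is no spike (index 0 always keeps vals[0]), else the value at j-1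
def pvFF (vals : List Int) (spikes : List Int) : Nat → Int
  | 0 => vals.getD 0 0
  | j + 1 => if ((j : Int) + 1) ∈ spikes then pvFF vals spikes j else vals.getD (j + 1) 0

theorem pvFF_congr (vals S S' : List Int) (h : ∀ x : Int, x ∈ S ↔ x ∈ S') :
    ∀ j, pvFF vals S j = pvFF vals S' j := by
  intro j
  induction j with
  | zero => rfl
  | succ m ih => simp only [pvFF, h, ih]

theorem pvFF_append (vals P : List Int) (i : Int) :
    ∀ j : Nat, (∀ m : Nat, 1 ≤ m → m ≤ j → (m : Int) ≠ i) →
      pvFF vals (P ++ [i]) j = pvFF vals P j := by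
  intro j
  induction j with
  | zero => intro _; rfl
  | succ m ih =>
    intro h
    have hne : ((m : Int) + 1) ≠ i := by
      have := h (m + 1) (by omega) (by omega); push_cast at this ⊢; omega
    simp only [pvFF, List.mem_append, List.mem_singleton, hne, or_false]
    rw [ih (fun k h1 h2 => h k h1 (by omega))]

theorem pvLoopA_inv (vals spikes : List Int) :
    ∀ n : Nat,
      (PySem.List.pyRange 0 (n : Int) 1).foldl
        (fun (st : List Int × Int) i =>
          if ¬ (i ∈ spikes) then (st.1 ++ [PySem.List.pyGetD vals i 0], PySem.List.pyGetD vals i 0)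
          else (st.1 ++ [st.2], st.2))
        ([], vals.getD 0 0)
      = ((List.range n).map (pvFF vals spikes), pvFF vals spikes (n - 1)) := by
  intro n
  induction n with
  | zero => simp [PySem.List.pyRange_one_eq_nil, pvFF]
  | succ m ih =>
    have hsucc : ((m + 1 : Nat) : Int) = (m : Int) + 1 := by push_cast; ring
    rw [hsucc, PySem.List.pyRange_one_succ_right (Int.natCast_nonneg m), List.foldl_append, ih]
    simp only [List.foldl_cons, List.foldl_nil, List.range_succ, List.map_append, List.map_cons,
      List.map_nil]
    by_cases hmem : ((m : Int) ∈ spikes)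
    · have hffm : pvFF vals spikes m = pvFF vals spikes (m - 1) := by
        cases m with
        | zero => rfl
        | succ k =>
          have : ((k : Int) + 1) ∈ spikes := by push_cast at hmem ⊢; exact_mod_cast hmem
          simp [pvFF, this]
      simp [hmem, hffm]
    · have hffm : pvFF vals spikes m = vals.getD m 0 := by
        cases m with
        | zero => rfl
        | succ k =>
          have : ¬ (((k : Int) + 1) ∈ spikes) := by
            intro hc; apply hmem; push_cast; exact_mod_cast hc
          simp [pvFF, this]
      simp [hmem, hffm, PySem.List.pyGetD_natCast]

-- A's loop output is the forward-fill map
theorem pvLoopA_eq (vals spikes : List Int) :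
    (pvLoopA vals spikes (PySem.List.pyGetD vals 0 0)).1
      = (List.range vals.length).map (pvFF vals spikes) := by
  unfold pvLoopA
  rw [PySem.List.len_eq, show PySem.List.pyGetD vals 0 0 = vals.getD 0 0 from
    PySem.List.pyGetD_zero vals 0]
  rw [pvLoopA_inv vals spikes vals.length]

-- one spike-patching step of B, on the fill for already-processed spikes P (all smaller than i)
theorem pvStep (vals P : List Int) (i : Int) (hP : ∀ a ∈ P, a < i) :
    (if 0 < i ∧ i < PySem.List.len ((List.range vals.length).map (pvFF vals P)) then
        PySem.List.pySetD ((List.range vals.length).map (pvFF vals P)) i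
          (PySem.List.pyGetD ((List.range vals.length).map (pvFF vals P)) (i - 1) 0)
      else (List.range vals.length).map (pvFF vals P))
    = (List.range vals.length).map (pvFF vals (P ++ [i])) := by
  have hlen : PySem.List.len ((List.range vals.length).map (pvFF vals P)) = (vals.length : Int) := by
    simp [PySem.List.len_eq]
  rw [hlen]
  by_cases hc : 0 < i ∧ i < (vals.length : Int)
  · -- i is a real interior index: out[i] := out[i-1]
    rw [if_pos hc]
    set t := i.toNat with ht
    have hi : i = (t : Int) := by omega
    have ht1 : 1 ≤ t := by omega
    have htn : t < vals.length := by omega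
    rw [hi] at hP ⊢
    rw [show ((t : Int) - 1) = ((t - 1 : Nat) : Int) by omega,
      PySem.List.pySetD_natCast, PySem.List.pyGetD_natCast]
    have hget : ((List.range vals.length).map (pvFF vals P)).getD (t - 1) 0 = pvFF vals P (t - 1) := by
      have h : t - 1 < vals.length := by omega
      simp [List.getD_eq_getElem?_getD, List.getElem?_map, List.getElem?_range h]
    rw [hget]
    apply List.ext_getElem
    · simp
    · intro j hj1 hj2
      simp only [List.length_set, List.length_map, List.length_range] at hj1
      rw [List.getElem_set]
      by_cases hjt : t = j
      · subst hjt
        simp only [if_true, List.getElem_map, List.getElem_range]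
        obtain ⟨u, hu⟩ : ∃ u, t = u + 1 := ⟨t - 1, by omega⟩
        rw [hu]
        have hmem : ((u : Int) + 1) ∈ P ++ [((u + 1 : Nat) : Int)] := by
          simp only [List.mem_append, List.mem_singleton]
          right; push_cast; ring
        simp only [pvFF, hmem, if_true, Nat.add_sub_cancel]
        rw [pvFF_append vals P ((u + 1 : Nat) : Int) u (fun m h1 h2 => by
          intro he; omega)]
      · simp only [hjt, if_false, List.getElem_map, List.getElem_range]
        by_cases hjlt : j < t
        · rw [pvFF_append vals P (t : Int) j (fun m h1 h2 => by intro he; omega)]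
        · -- j > t: index j is no spike in P (all < i) nor i itself: both sides are vals[j]
          have hjgt : t < j := by omega
          cases j with
          | zero => omega
          | succ k =>
            have h1 : ¬ (((k : Int) + 1) ∈ P ++ [(t : Int)]) := by
              simp only [List.mem_append, List.mem_singleton]
              push Not
              constructor
              · intro hk; have := hP _ hk; omega
              · omega
            have h2 : ¬ (((k : Int) + 1) ∈ P) := by
              intro hk; have := hP _ hk; omega
            simp only [pvFF, h1, h2, if_false]
  · -- i not an interior index of vals: membership of i is never tested by the fill
    rw [if_neg hc]
    apply List.map_congr_left
    intro j hj
    rw [List.mem_range] at hj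
    rw [pvFF_append vals P i j (fun m h1 h2 => by
      rcases not_and_or.mp hc with h | h
      · intro he; omega
      · intro he; omega)]

theorem pvFold (vals : List Int) :
    ∀ (l P : List Int), l.Pairwise (· < ·) → (∀ a ∈ P, ∀ b ∈ l, a < b) →
      l.foldl
        (fun (out : List Int) i =>
          if 0 < i ∧ i < PySem.List.len out then
            PySem.List.pySetD out i (PySem.List.pyGetD out (i - 1) 0)
          else out)
        ((List.range vals.length).map (pvFF vals P))
      = (List.range vals.length).map (pvFF vals (P ++ l)) := by
  intro l
  induction l with
  | nil => intro P _ _; simp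
  | cons i rest ih =>
    intro P hpw hord
    rw [List.foldl_cons, pvStep vals P i (fun a ha => hord a ha i (List.mem_cons_self))]
    rw [ih (P ++ [i]) (List.pairwise_cons.mp hpw).2]
    · simp
    · intro a ha b hb
      rcases List.mem_append.mp ha with h | h
      · exact hord a h b (List.mem_cons_of_mem _ hb)
      · rw [List.mem_singleton.mp h]
        exact (List.pairwise_cons.mp hpw).1 b hb

theorem pvMapGetD (vals : List Int) :
    (List.range vals.length).map (fun j => vals.getD j 0) = vals := by
  apply List.ext_getElem
  · simp
  · intro j hj1 hj2
    simp only [List.length_map, List.length_range] at hj1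
    simp [List.getD_eq_getElem?_getD, List.getElem?_eq_getElem hj1]

theorem pvFF_nil (vals : List Int) : ∀ j, pvFF vals [] j = vals.getD j 0 := by
  intro j
  cases j with
  | zero => rfl
  | succ k => simp [pvFF]

-- B's fill equals the forward-fill map
theorem pvFfill_eq (vals spikes : List Int) :
    pvFfill vals spikes = (List.range vals.length).map (pvFF vals spikes) := by
  unfold pvFfill
  have hstart : vals = (List.range vals.length).map (pvFF vals []) := by
    rw [(List.map_congr_left (fun j _ => pvFF_nil vals j) :
      (List.range vals.length).map (pvFF vals []) = _), pvMapGetD]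
  conv_lhs => rw [hstart]
  rw [pvFold vals _ [] (PySem.List.sorted_ofList_pairwise_lt spikes)
    (fun a ha => absurd ha (List.not_mem_nil)), List.nil_append]
  apply List.map_congr_left
  intro j _
  apply pvFF_congr
  intro x
  rw [PySem.List.mem_sorted, PySem.Set.mem_ofList]

theorem remove_noise_spec : Claim_equal_remove_noise := by
  intro px py x_spikes y_spikes _ _
  unfold Spec_remove_noise remove_noise remove_noise_alt
  simp only []
  rw [pvLoopA_eq px x_spikes, pvLoopA_eq py y_spikes, pvFfill_eq px x_spikes,
    pvFfill_eq py y_spikes]
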